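-- pv_equiv track=rewrite | github.com/miliar/Code_Jam_Webscraper | solutions_python/Problem_155/1223.py | solve
-- ===== SOURCE A (Python) =====
-- def solve(n, s):
--     nb = s[0]
--     toadd = 0
--     for i in range(1, n+1):
--         if nb < i:
--             toadd += (i-nb)
--             nb = i
--         nb += s[i]
--     return toadd
-- ===== SOURCE B (Python) =====
-- def solve(n, s):
--     # Divide and conquer: scan(lo, hi) returns (segment sum, max deficit within
--     # the segment relative to its start); combine halves with an offset shift.
--     if n <= 0:
--         return 0
--
--     def scan(lo, hi):
--         if hi - lo == 1:
--             x = s[lo]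
--             return (x, 1 - x)
--         mid = (lo + hi) // 2
--         sl, ml = scan(lo, mid)
--         sr, mr = scan(mid, hi)
--         return (sl + sr, max(ml, (mid - lo) - sl + mr))
--
--     _, m = scan(0, n)
--     return max(0, m)
-- ===== Notes on version B (the rewrite author's own statement) =====
-- stated objective: alternative
-- what changed: B replaces A's sequential greedy loop (bump a patched counter up to i, summing the bumps) by a divide-and-conquer recursion: each half reports (segment sum, max relative deficit) and halves are merged with an offset shift, the answer being max(0, max deficit).
import Mathlib
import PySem

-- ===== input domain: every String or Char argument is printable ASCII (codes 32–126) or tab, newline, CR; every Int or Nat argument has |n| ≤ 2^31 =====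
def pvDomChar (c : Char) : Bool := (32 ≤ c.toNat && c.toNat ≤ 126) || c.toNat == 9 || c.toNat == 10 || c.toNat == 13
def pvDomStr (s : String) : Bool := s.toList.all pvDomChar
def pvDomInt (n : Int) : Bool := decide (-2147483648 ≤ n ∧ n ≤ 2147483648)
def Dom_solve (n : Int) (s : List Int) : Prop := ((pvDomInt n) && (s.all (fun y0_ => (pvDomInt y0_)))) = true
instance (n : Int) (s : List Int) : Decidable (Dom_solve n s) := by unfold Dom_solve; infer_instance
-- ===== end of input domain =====

-- B replaces A's sequential greedy loop by a divide-and-conquer recursion combining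
-- (segment sum, max relative deficit) of the two halves; same O(n), a genuinely
-- different traversal of the data.

-- ===== PORT A =====
def solve (n : Int) (s : List Int) : Int :=
  ((PySem.List.pyRange 1 (n + 1) 1).foldl
    (fun st i =>
      let p := if st.1 < i then (i, st.2 + (i - st.1)) else (st.1, st.2)
      (p.1 + PySem.List.pyGetD s i 0, p.2))
    (PySem.List.pyGetD s 0 0, 0)).2

-- ===== PORT B =====
-- scan(lo, hi) of Source B.  The extra 'fuel' argument is only a structural totality
-- guard: it is consumed once per level of the recursion, solve_alt passes n.toNat,
-- and the proof shows any fuel with (hi - lo).toNat <= fuel + 1 reaches the same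
-- branches Python does, so the fuel-0 base case coincides with Python's base case.
def scanB : List Int → Nat → Int → Int → Int × Int
  | s, 0, lo, _hi =>
    let x := PySem.List.pyGetD s lo 0
    (x, 1 - x)
  | s, Nat.succ f, lo, hi =>
    if hi - lo ≤ 1 then
      let x := PySem.List.pyGetD s lo 0
      (x, 1 - x)
    else
      let mid := PySem.Int.floordiv (lo + hi) 2
      let l := scanB s f lo mid
      let r := scanB s f mid hi
      (l.1 + r.1, max l.2 ((mid - lo) - l.1 + r.2))

def solve_alt (n : Int) (s : List Int) : Int :=
  if n ≤ 0 then 0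
  else max 0 (scanB s n.toNat 0 n).2

-- ===== PRECONDITION & SPEC =====
-- A reads s[0] and s[1..n]: it raises IndexError iff s = [] or n ≥ len(s).
def Pre_solve (n : Int) (s : List Int) : Prop := s ≠ [] ∧ n < (s.length : Int)
instance (n : Int) (s : List Int) : Decidable (Pre_solve n s) := by unfold Pre_solve; infer_instance
def pvWitness_solve : Int × List Int := (3, [1, 0, -2, 4])

def Spec_solve (n : Int) (s : List Int) (out : Int) : Prop := out = solve_alt n s
instance (n : Int) (s : List Int) (out : Int) : Decidable (Spec_solve n s out) := by unfold Spec_solve; infer_instance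

-- ===== CLAIM (what is proved, stated in full; the proofs are below) =====
def Claim_equal_solve : Prop := ∀ (n : Int) (s : List Int), Dom_solve n s → Pre_solve n s → Spec_solve n s (solve n s)

-- ===== LEMMAS AND PROOFS =====

-- Max deficit of a nonempty list t: max over j = 1..len t of (j - sum t[:j]).
def Mspec : List Int → Int
  | [] => 0
  | [x] => 1 - x
  | x :: y :: rest => max (1 - x) (1 - x + Mspec (y :: rest))

theorem Mspec_cons (x : Int) (t : List Int) (ht : t ≠ []) :
    Mspec (x :: t) = max (1 - x) (1 - x + Mspec t) := by
  cases t with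
  | nil => exact absurd rfl ht
  | cons y r => rfl

-- Merge law for Mspec on nonempty halves.
theorem Mspec_append (l r : List Int) (hl : l ≠ []) (hr : r ≠ []) :
    Mspec (l ++ r) = max (Mspec l) ((l.length : Int) - l.sum + Mspec r) := by
  induction l with
  | nil => exact absurd rfl hl
  | cons x l' ih =>
    cases l' with
    | nil =>
      simp only [List.cons_append, List.nil_append]
      rw [Mspec_cons x r hr]
      simp [Mspec]
    | cons y l'' =>
      have hl' : (y :: l'') ≠ [] := by simp
      rw [List.cons_append, Mspec_cons x ((y :: l'') ++ r) (by simp),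
        ih hl', Mspec_cons x (y :: l'') hl']
      simp only [List.length_cons, List.sum_cons]
      push_cast
      omega

-- the common base case of scanB computes (sum, Mspec) of the one-element slice
theorem scanB_base (s : List Int) (lo hi : Int)
    (h0 : 0 ≤ lo) (h1 : hi - lo = 1) (hle : hi ≤ (s.length : Int)) :
    ((PySem.List.pyGetD s lo 0, 1 - PySem.List.pyGetD s lo 0) : Int × Int) =
      (((s.drop lo.toNat).take (hi - lo).toNat).sum,
       Mspec ((s.drop lo.toNat).take (hi - lo).toNat)) := by
  have hidx : lo.toNat < s.length := by omega
  have hget : PySem.List.pyGetD s lo 0 = s[lo.toNat] :=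
    PySem.List.pyGetD_eq_getElem _ _ h0 (by omega)
  have hslice : (s.drop lo.toNat).take (hi - lo).toNat = [s[lo.toNat]] := by
    have h1' : (hi - lo).toNat = 1 := by omega
    have hc : s.drop lo.toNat = s[lo.toNat] :: s.drop (lo.toNat + 1) :=
      List.drop_eq_getElem_cons hidx
    rw [h1', hc]
    rfl
  rw [hget, hslice, List.sum_singleton]
  rfl

-- scanB on an in-range segment, given enough fuel, computes (sum, Mspec) of the slice.
theorem scanB_eq (s : List Int) : ∀ (fuel : Nat) (lo hi : Int),
    0 ≤ lo → lo < hi → hi ≤ (s.length : Int) → (hi - lo).toNat ≤ fuel + 1 →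
    scanB s fuel lo hi =
      (((s.drop lo.toNat).take (hi - lo).toNat).sum,
       Mspec ((s.drop lo.toNat).take (hi - lo).toNat)) := by
  intro fuel
  induction fuel with
  | zero =>
    intro lo hi h0 hlt hle hf
    have h1 : hi - lo = 1 := by omega
    rw [scanB]
    exact scanB_base s lo hi h0 h1 hle
  | succ f ih =>
    intro lo hi h0 hlt hle hf
    rw [scanB]
    by_cases hb : hi - lo ≤ 1
    · rw [if_pos hb]
      exact scanB_base s lo hi h0 (by omega) hle
    · rw [if_neg hb]
      have hmid : PySem.Int.floordiv (lo + hi) 2 = (lo + hi) / 2 := by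
        simp [PySem.Int.floordiv, Int.fdiv_eq_ediv]
      rw [hmid]
      have hm1 : lo < (lo + hi) / 2 := by omega
      have hm2 : (lo + hi) / 2 < hi := by omega
      set mid := (lo + hi) / 2 with hmdef
      have e1 := ih lo mid h0 hm1 (by omega) (by omega)
      have e2 := ih mid hi (by omega) hm2 hle (by omega)
      simp only [e1, e2]
      have hnat : (hi - lo).toNat = (mid - lo).toNat + (hi - mid).toNat := by omega
      have hdd : (s.drop lo.toNat).drop (mid - lo).toNat = s.drop mid.toNat := by
        rw [List.drop_drop]; congr 1; omega
      have hsplit :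
          (s.drop lo.toNat).take (hi - lo).toNat =
            ((s.drop lo.toNat).take (mid - lo).toNat) ++
            ((s.drop mid.toNat).take (hi - mid).toNat) := by
        rw [hnat, List.take_add, hdd]
      have hlenl : ((s.drop lo.toNat).take (mid - lo).toNat).length = (mid - lo).toNat := by
        simp [List.length_take, List.length_drop]; omega
      have hnel : (s.drop lo.toNat).take (mid - lo).toNat ≠ [] := by
        intro h; rw [h] at hlenl; simp at hlenl; omega
      have hlenr : ((s.drop mid.toNat).take (hi - mid).toNat).length = (hi - mid).toNat := by
        simp [List.length_take, List.length_drop]; omega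
      have hner : (s.drop mid.toNat).take (hi - mid).toNat ≠ [] := by
        intro h; rw [h] at hlenr; simp at hlenr; omega
      rw [hsplit, Mspec_append _ _ hnel hner, List.sum_append, hlenl]
      have hcast : ((mid - lo).toNat : Int) = mid - lo := by omega
      rw [hcast]

-- A's fold equals the fold that keeps the true (never patched) running sum and
-- the running maximum deficit (invariant: nb = tot + ta and ta = tb).
theorem pv_fold_inv (s : List Int) (r : List Int) (nb tot ta tb : Int)
    (h1 : nb = tot + ta) (h2 : ta = tb) :
    ((r.foldl
      (fun st i =>
        let p := if st.1 < i then (i, st.2 + (i - st.1)) else (st.1, st.2)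
        (p.1 + PySem.List.pyGetD s i 0, p.2))
      (nb, ta)).2 : Int) =
    (r.foldl (fun st i => (st.1 + PySem.List.pyGetD s i 0, max st.2 (i - st.1)))
      (tot, tb)).2 := by
  induction r generalizing nb tot ta tb with
  | nil => simpa using h2
  | cons i rest ih =>
    simp only [List.foldl_cons]
    by_cases h : nb < i
    · simp only [h, if_pos]
      exact ih (i + PySem.List.pyGetD s i 0) (tot + PySem.List.pyGetD s i 0)
        (ta + (i - nb)) (max tb (i - tot)) (by omega) (by omega)
    · simp only [h, if_neg, not_false_iff]
      exact ih (nb + PySem.List.pyGetD s i 0) (tot + PySem.List.pyGetD s i 0)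
        ta (max tb (i - tot)) (by omega) (by omega)

-- The running-max fold over i = k..n, started at the true prefix sum s[:k],
-- computes max m ((k-1) - sum s[:k-1] + Mspec s[k-1..n-1]).
theorem pv_maxfold (s : List Int) (n : Int) (hn : n < (s.length : Int)) :
    ∀ (d : Nat) (k m : Int), 1 ≤ k → k ≤ n → (n - k).toNat = d →
    ((PySem.List.pyRange k (n + 1) 1).foldl
        (fun st i => (st.1 + PySem.List.pyGetD s i 0, max st.2 (i - st.1)))
        ((s.take k.toNat).sum, m)).2 =
      max m ((k - 1) - (s.take (k - 1).toNat).sum +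
        Mspec ((s.drop (k - 1).toNat).take (n - k + 1).toNat)) := by
  intro d
  induction d with
  | zero =>
    intro k m hk1 hkn hd
    have hkn' : k = n := by omega
    subst hkn'
    have hr : PySem.List.pyRange k (k + 1) 1 = [k] := PySem.List.pyRange_one_singleton k
    have hidx : (k - 1).toNat < s.length := by omega
    have hget : PySem.List.pyGetD s k 0 = s[k.toNat] :=
      PySem.List.pyGetD_eq_getElem _ _ (by omega) (by omega)
    have hslice : (s.drop (k - 1).toNat).take (k - k + 1).toNat = [s[(k - 1).toNat]] := by
      have h1 : (k - k + 1).toNat = 1 := by omega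
      have hc : s.drop (k - 1).toNat = s[(k - 1).toNat] :: s.drop ((k - 1).toNat + 1) :=
        List.drop_eq_getElem_cons hidx
      rw [h1, hc]
      rfl
    have hx : Mspec ((s.drop (k - 1).toNat).take (k - k + 1).toNat) = 1 - s[(k - 1).toNat] := by
      rw [hslice]
      rfl
    have hsum : (s.take k.toNat).sum = (s.take (k - 1).toNat).sum + s[(k - 1).toNat] := by
      have h2 : k.toNat = (k - 1).toNat + 1 := by omega
      rw [h2, List.take_add_one, List.getElem?_eq_getElem hidx, List.sum_append]
      simp
    rw [hr]
    simp only [List.foldl_cons, List.foldl_nil]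
    rw [hx, hsum]
    omega
  | succ d ih =>
    intro k m hk1 hkn hd
    have hklt : k < n := by omega
    have hkidx : k.toNat < s.length := by omega
    have hget : PySem.List.pyGetD s k 0 = s[k.toNat] :=
      PySem.List.pyGetD_eq_getElem _ _ (by omega) (by omega)
    have htk : s.take (k.toNat + 1) = s.take k.toNat ++ [s[k.toNat]] := by
      rw [List.take_add_one, List.getElem?_eq_getElem hkidx]
      rfl
    have hstep : (s.take k.toNat).sum + PySem.List.pyGetD s k 0
        = (s.take (k + 1).toNat).sum := by
      have h2 : (k + 1).toNat = k.toNat + 1 := by omega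
      rw [h2, htk, hget, List.sum_append]
      simp
    rw [PySem.List.pyRange_one_cons (by omega)]
    simp only [List.foldl_cons]
    have ihk := ih (k + 1) (max m (k - (s.take k.toNat).sum)) (by omega) (by omega) (by omega)
    have hr1 : k + 1 - 1 = k := by ring
    rw [hr1] at ihk
    have hr2 : n - (k + 1) + 1 = n - k := by ring
    rw [hr2] at ihk
    rw [hstep]
    rw [ihk]
    -- unfold the head of the (k-1)-slice
    have hk1idx : (k - 1).toNat < s.length := by omega
    have hcons : (s.drop (k - 1).toNat).take (n - k + 1).toNat
        = s[(k - 1).toNat] :: (s.drop k.toNat).take (n - k).toNat := by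
      have hdropc : s.drop (k - 1).toNat = s[(k - 1).toNat] :: s.drop ((k - 1).toNat + 1) :=
        List.drop_eq_getElem_cons hk1idx
      have hkk : (k - 1).toNat + 1 = k.toNat := by omega
      have htn : (n - k + 1).toNat = (n - k).toNat + 1 := by omega
      rw [hdropc, hkk, htn, List.take_succ_cons]
    have hner : (s.drop k.toNat).take (n - k).toNat ≠ [] := by
      have : ((s.drop k.toNat).take (n - k).toNat).length = (n - k).toNat := by
        simp [List.length_take, List.length_drop]; omega
      intro h; rw [h] at this; simp at this; omega
    rw [hcons, Mspec_cons _ _ hner]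
    have hsum2 : (s.take k.toNat).sum = (s.take (k - 1).toNat).sum + s[(k - 1).toNat] := by
      have h2 : k.toNat = (k - 1).toNat + 1 := by omega
      rw [h2, List.take_add_one, List.getElem?_eq_getElem hk1idx, List.sum_append]
      simp
    rw [hsum2]
    omega

-- under Pre_, pyGetD s 0 0 = s[0] and s.take 1 sums to s[0]
theorem pv_take_one (s : List Int) (hs : s ≠ []) :
    (s.take 1).sum = PySem.List.pyGetD s 0 0 := by
  cases s with
  | nil => exact absurd rfl hs
  | cons x t => simp [PySem.List.pyGetD_zero_cons]

-- ===== VERDICT (by name: the statement is the Claim_ definition above) =====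
theorem solve_spec : Claim_equal_solve := by
  intro n s _ hpre
  obtain ⟨hs, hn⟩ := hpre
  unfold Spec_solve solve solve_alt
  by_cases h0 : n ≤ 0
  · rw [PySem.List.pyRange_one_eq_nil (by omega)]
    simp [h0]
  · simp only [h0, if_neg, not_false_iff]
    have hA := pv_fold_inv s (PySem.List.pyRange 1 (n + 1) 1)
      (PySem.List.pyGetD s 0 0) (PySem.List.pyGetD s 0 0) 0 0 (by omega) rfl
    rw [hA]
    have h1 : (s.take (1 : Int).toNat).sum = PySem.List.pyGetD s 0 0 := by
      simpa using pv_take_one s hs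
    rw [← h1]
    have hmf := pv_maxfold s n hn (n - 1).toNat 1 0 (by omega) (by omega) rfl
    rw [hmf]
    have hB := scanB_eq s n.toNat 0 n (by omega) (by omega) (by omega) (by omega)
    rw [hB]
    simp
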